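-- pv_equiv track=rewrite | github.com/geekyfaahad/Awaaz-news | backend/debug_askai.py | _check_subject_action_alignment
-- ===== SOURCE A (Python) =====
-- _SERIOUS_CLAIM_BRIDGE_WORDS = frozenset({
--     "is", "was", "were", "has", "have", "had", "been", "being", "be",
--     "found", "confirmed", "reportedly", "reported", "declared",
--     "officially", "now", "feared",
-- })
--
-- def _find_subject_spans(claim_subjects, headline_tokens):
--     if not claim_subjects or not headline_tokens:
--         return []
--
--     unique_subjects = list(dict.fromkeys(claim_subjects))
--     required_matches = 1 if len(unique_subjects) == 1 else 2
--     spans = []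
--
--     for start in range(len(headline_tokens)):
--         if headline_tokens[start] != unique_subjects[0]:
--             continue
--
--         matched = 1
--         last_pos = start
--         for token in unique_subjects[1:]:
--             found_pos = None
--             for pos in range(last_pos + 1, min(len(headline_tokens), last_pos + 3)):
--                 if headline_tokens[pos] == token:
--                     found_pos = pos
--                     break
--             if found_pos is None:
--                 break
--             matched += 1
--             last_pos = found_pos
--
--         if matched >= required_matches:
--             spans.append((start, last_pos))
--
--     return spans
--
-- def _check_subject_action_alignment(claim_subjects, claim_actions, headline_tokens, headline_actions):
--     if not claim_subjects or not headline_tokens: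
--         return False
--     subject_spans = _find_subject_spans(claim_subjects, headline_tokens)
--     action_positions = [i for i, t in enumerate(headline_tokens) if t in headline_actions]
--     if not action_positions or not subject_spans:
--         return False
--     for act_pos in action_positions:
--         for span_start, span_end in subject_spans:
--             if span_end < act_pos:
--                 bridge = headline_tokens[span_end + 1:act_pos]
--                 if len(bridge) <= 2 and all(t in _SERIOUS_CLAIM_BRIDGE_WORDS for t in bridge):
--                     return True
--             if act_pos < span_start:
--                 if act_pos + 1 >= len(headline_tokens) or headline_tokens[act_pos + 1] != "of":
--                     continue
--                 bridge = headline_tokens[act_pos + 2:span_start]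
--                 if len(bridge) <= 2 and all(t in _SERIOUS_CLAIM_BRIDGE_WORDS for t in bridge):
--                     return True
--     return False
-- ===== SOURCE B (Python) =====
-- _SERIOUS_CLAIM_BRIDGE_WORDS = frozenset({
--     "is", "was", "were", "has", "have", "had", "been", "being", "be",
--     "found", "confirmed", "reportedly", "reported", "declared",
--     "officially", "now", "feared",
-- })
--
-- def _check_subject_action_alignment(claim_subjects, claim_actions, headline_tokens, headline_actions):
--     tokens = headline_tokens
--     n = len(tokens)
--     if not claim_subjects or n == 0:
--         return False
--     unique = list(dict.fromkeys(claim_subjects))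
--     actions = set(headline_actions)
--     need = 0 if len(unique) == 1 else 1
--
--     def extend(pos, subs):
--         # greedily match each remaining subject within the next 2 tokens
--         m = 0
--         for t in subs:
--             if pos + 1 < n and tokens[pos + 1] == t:
--                 pos += 1
--             elif pos + 2 < n and tokens[pos + 2] == t:
--                 pos += 2
--             else:
--                 break
--             m += 1
--         return m, pos
--
--     for start in range(n):
--         if tokens[start] != unique[0]:
--             continue
--         m, end = extend(start, unique[1:])
--         if m < need:
--             continue
--         # action within 3 tokens after the span, bridged only by bridge words
--         j = end + 1
--         while j <= end + 3 and j < n: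
--             if tokens[j] in actions:
--                 return True
--             if tokens[j] not in _SERIOUS_CLAIM_BRIDGE_WORDS:
--                 break
--             j += 1
--         # action shortly before the span, followed by "of" and bridge words
--         for act in range(max(0, start - 4), start):
--             if (tokens[act] in actions and act + 1 < n
--                     and tokens[act + 1] == "of"
--                     and all(t in _SERIOUS_CLAIM_BRIDGE_WORDS
--                             for t in tokens[act + 2:start])):
--                 return True
--     return False
-- ===== Notes on version B (the rewrite author's own statement) =====
-- stated objective: alternative
-- what changed: B drops A's materialised action-position list and the all-action-positions-times-all-spans cross-product scan; instead it checks, per candidate span, only the constant-size windows (up to 3 tokens after the span end, up to 4 before the span start) where a <=2-word bridge can possibly exist, using a set for action membership.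
import Mathlib
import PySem

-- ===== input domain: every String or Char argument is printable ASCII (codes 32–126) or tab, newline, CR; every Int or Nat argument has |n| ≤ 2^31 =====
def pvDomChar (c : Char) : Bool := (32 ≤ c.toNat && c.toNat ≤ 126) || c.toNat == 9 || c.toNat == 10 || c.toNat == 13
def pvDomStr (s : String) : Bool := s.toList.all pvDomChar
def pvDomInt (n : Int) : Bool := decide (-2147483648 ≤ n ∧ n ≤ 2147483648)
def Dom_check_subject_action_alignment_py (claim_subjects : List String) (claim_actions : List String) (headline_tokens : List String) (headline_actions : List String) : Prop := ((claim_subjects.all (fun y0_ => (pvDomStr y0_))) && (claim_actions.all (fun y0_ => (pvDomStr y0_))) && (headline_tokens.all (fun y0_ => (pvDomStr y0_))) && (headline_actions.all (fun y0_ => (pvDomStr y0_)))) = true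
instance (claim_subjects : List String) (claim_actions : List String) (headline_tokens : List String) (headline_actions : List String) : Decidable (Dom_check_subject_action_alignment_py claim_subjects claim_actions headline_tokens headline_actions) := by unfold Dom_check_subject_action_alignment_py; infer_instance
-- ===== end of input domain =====

-- B removes A's cross product of all action positions against all subject spans and instead
-- probes only the constant-size windows around each span where a <=2-word bridge can exist (alternative algorithm).
-- All loop indices are natural numbers in the Python (range/len based), so both ports use Nat
-- indices and drop/take for the nonnegative slices; this is exact on these inputs.

-- ===== PORT A =====
def pvBridgeWords : List String :=
  ["is", "was", "were", "has", "have", "had", "been", "being", "be",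
   "found", "confirmed", "reportedly", "reported", "declared",
   "officially", "now", "feared"]

-- inner loop 'for pos in range(last_pos+1, min(n, last_pos+3)): if tokens[pos]==token: found_pos=pos; break'
def pvFindPosA (tokens : List String) (token : String) (last : Nat) : Option Nat :=
  (List.range' (last + 1) (min tokens.length (last + 3) - (last + 1))).find?
    (fun pos => tokens.getD pos "" == token)

-- middle loop 'for token in unique_subjects[1:]' carrying (matched, last_pos), break on failure
def pvMatchLoopA (tokens : List String) (subs : List String) (matched last : Nat) : Nat × Nat :=
  match subs with
  | [] => (matched, last)
  | t :: rest =>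
    match pvFindPosA tokens t last with
    | none => (matched, last)
    | some p => pvMatchLoopA tokens rest (matched + 1) p

def pvFindSubjectSpans (claim_subjects headline_tokens : List String) : List (Nat × Nat) :=
  if claim_subjects = [] ∨ headline_tokens = [] then []
  else
    let unique := PySem.List.dedup claim_subjects
    let required := if unique.length = 1 then 1 else 2
    (List.range headline_tokens.length).foldl (fun spans start =>
      if (headline_tokens.getD start "" == unique.headD "") = false then spans
      else
        let ml := pvMatchLoopA headline_tokens unique.tail 1 start
        if required ≤ ml.1 then spans ++ [(start, ml.2)] else spans) []

def pvBridgeOkA (bridge : List String) : Bool :=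
  decide (bridge.length ≤ 2) && bridge.all (fun t => pvBridgeWords.contains t)

def check_subject_action_alignment_py (claim_subjects : List String) (claim_actions : List String) (headline_tokens : List String) (headline_actions : List String) : Bool :=
  if claim_subjects = [] ∨ headline_tokens = [] then false
  else
    let spans := pvFindSubjectSpans claim_subjects headline_tokens
    let action_positions := (List.range headline_tokens.length).filter
      (fun i => headline_actions.contains (headline_tokens.getD i ""))
    if action_positions = [] ∨ spans = [] then false
    else
      action_positions.any (fun act => spans.any (fun se =>
        (decide (se.2 < act) &&
           pvBridgeOkA ((headline_tokens.drop (se.2 + 1)).take (act - (se.2 + 1)))) ||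
        (decide (act < se.1) &&
           (if decide (headline_tokens.length ≤ act + 1) ||
               (headline_tokens.getD (act + 1) "" != "of") then false
            else pvBridgeOkA ((headline_tokens.drop (act + 2)).take (se.1 - (act + 2)))))))

-- ===== PORT B =====
-- (B uses the same module-level bridge-word constant pvBridgeWords)
-- 'extend(pos, subs)': greedily match each subject within the next 2 tokens
def pvExtendB (tokens : List String) (pos : Nat) (subs : List String) (m : Nat) : Nat × Nat :=
  match subs with
  | [] => (m, pos)
  | t :: rest =>
    if decide (pos + 1 < tokens.length) && (tokens.getD (pos + 1) "" == t) then
      pvExtendB tokens (pos + 1) rest (m + 1)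
    else if decide (pos + 2 < tokens.length) && (tokens.getD (pos + 2) "" == t) then
      pvExtendB tokens (pos + 2) rest (m + 1)
    else (m, pos)

-- 'while j <= end+3 and j < n' — the up-to-3 iterations are the fuel (called with fuel = 3)
def pvFwdScanB (tokens actions : List String) (j : Nat) (fuel : Nat) : Bool :=
  match fuel with
  | 0 => false
  | f + 1 =>
    if decide (j < tokens.length) then
      if actions.contains (tokens.getD j "") then true
      else if pvBridgeWords.contains (tokens.getD j "") then pvFwdScanB tokens actions (j + 1) f
      else false
    else false

-- 'for act in range(max(0, start-4), start)' (Nat subtraction is the max with 0)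
def pvBwdB (tokens actions : List String) (start : Nat) : Bool :=
  (List.range' (start - 4) (start - (start - 4))).any (fun act =>
    actions.contains (tokens.getD act "") &&
    decide (act + 1 < tokens.length) &&
    (tokens.getD (act + 1) "" == "of") &&
    ((tokens.drop (act + 2)).take (start - (act + 2))).all (fun t => pvBridgeWords.contains t))

def check_subject_action_alignment_py_alt (claim_subjects : List String) (claim_actions : List String) (headline_tokens : List String) (headline_actions : List String) : Bool :=
  if claim_subjects = [] ∨ headline_tokens = [] then false
  else
    let unique := PySem.List.dedup claim_subjects
    let need := if unique.length = 1 then 0 else 1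
    (List.range headline_tokens.length).any (fun start =>
      (headline_tokens.getD start "" == unique.headD "") &&
      (let me := pvExtendB headline_tokens start unique.tail 0
       decide (need ≤ me.1) &&
       (pvFwdScanB headline_tokens headline_actions (me.2 + 1) 3 ||
        pvBwdB headline_tokens headline_actions start)))

-- ===== PRECONDITION & SPEC =====
def Spec_check_subject_action_alignment_py (claim_subjects : List String) (claim_actions : List String) (headline_tokens : List String) (headline_actions : List String) (out : Bool) : Prop := out = check_subject_action_alignment_py_alt claim_subjects claim_actions headline_tokens headline_actions
instance (claim_subjects : List String) (claim_actions : List String) (headline_tokens : List String) (headline_actions : List String) (out : Bool) : Decidable (Spec_check_subject_action_alignment_py claim_subjects claim_actions headline_tokens headline_actions out) := by unfold Spec_check_subject_action_alignment_py; infer_instance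

-- ===== CLAIM (what is proved, stated in full; the proofs are below) =====
def Claim_equal_check_subject_action_alignment_py : Prop := ∀ (claim_subjects : List String) (claim_actions : List String) (headline_tokens : List String) (headline_actions : List String), Dom_check_subject_action_alignment_py claim_subjects claim_actions headline_tokens headline_actions → Spec_check_subject_action_alignment_py claim_subjects claim_actions headline_tokens headline_actions (check_subject_action_alignment_py claim_subjects claim_actions headline_tokens headline_actions)

-- ===== LEMMAS AND PROOFS =====

-- A's bounded inner search equals B's two explicit probes
theorem pvFindPosA_eq (tokens : List String) (t : String) (pos : Nat) :
    pvFindPosA tokens t pos =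
      (if decide (pos + 1 < tokens.length) && (tokens.getD (pos + 1) "" == t) then some (pos + 1)
       else if decide (pos + 2 < tokens.length) && (tokens.getD (pos + 2) "" == t) then some (pos + 2)
       else none) := by
  unfold pvFindPosA
  by_cases h1 : pos + 1 < tokens.length
  · by_cases h2 : pos + 2 < tokens.length
    · have hm : min tokens.length (pos + 3) - (pos + 1) = 2 := by omega
      rw [hm]
      simp only [List.range', List.find?]
      cases hb1 : (tokens.getD (pos + 1) "" == t) <;>
        cases hb2 : (tokens.getD (pos + 2) "" == t) <;>
          simp_all [h1, h2]
    · have hm : min tokens.length (pos + 3) - (pos + 1) = 1 := by omega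
      rw [hm]
      simp only [List.range', List.find?]
      cases hb1 : (tokens.getD (pos + 1) "" == t) <;> simp_all [h1, h2]
  · have hm : min tokens.length (pos + 3) - (pos + 1) = 0 := by omega
    rw [hm]
    have h2 : ¬ pos + 2 < tokens.length := by omega
    simp [List.find?, h1, h2]

-- A's match loop equals B's extend, counts off by one
theorem pvMatchLoopA_eq (tokens : List String) (subs : List String) : ∀ (pos m : Nat),
    pvMatchLoopA tokens subs (m + 1) pos =
      ((pvExtendB tokens pos subs m).1 + 1, (pvExtendB tokens pos subs m).2) := by
  induction subs with
  | nil => intro pos m; simp [pvMatchLoopA, pvExtendB]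
  | cons t rest ih =>
    intro pos m
    simp only [pvMatchLoopA, pvExtendB, pvFindPosA_eq]
    split_ifs with hA hB
    · simpa using ih (pos + 1) (m + 1)
    · simpa using ih (pos + 2) (m + 1)
    · simp

-- membership in A's span list
theorem pvFindSubjectSpans_mem (cs ht : List String) (hcs : cs ≠ []) (hht : ht ≠ []) (x : Nat × Nat) :
    x ∈ pvFindSubjectSpans cs ht ↔
      ∃ s, s < ht.length ∧ (ht.getD s "" == (PySem.List.dedup cs).headD "") = true ∧
        (if (PySem.List.dedup cs).length = 1 then 1 else 2) ≤ (pvMatchLoopA ht (PySem.List.dedup cs).tail 1 s).1 ∧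
        x = (s, (pvMatchLoopA ht (PySem.List.dedup cs).tail 1 s).2) := by
  unfold pvFindSubjectSpans
  rw [if_neg (by simp [hcs, hht])]
  show (x ∈ List.foldl (fun spans start =>
      if (ht.getD start "" == (PySem.List.dedup cs).headD "") = false then spans
      else
        let ml := pvMatchLoopA ht (PySem.List.dedup cs).tail 1 start
        if (if (PySem.List.dedup cs).length = 1 then 1 else 2) ≤ ml.1 then spans ++ [(start, ml.2)]
        else spans) [] (List.range ht.length)) ↔ _
  have hcongr : ∀ (acc : List (Nat × Nat)) (s : Nat), s ∈ List.range ht.length →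
      (if (ht.getD s "" == (PySem.List.dedup cs).headD "") = false then acc
       else
         let ml := pvMatchLoopA ht (PySem.List.dedup cs).tail 1 s
         if (if (PySem.List.dedup cs).length = 1 then 1 else 2) ≤ ml.1 then acc ++ [(s, ml.2)] else acc)
      = (if ((ht.getD s "" == (PySem.List.dedup cs).headD "") &&
             decide ((if (PySem.List.dedup cs).length = 1 then 1 else 2) ≤ (pvMatchLoopA ht (PySem.List.dedup cs).tail 1 s).1)) then
           acc ++ [(s, (pvMatchLoopA ht (PySem.List.dedup cs).tail 1 s).2)] else acc) := by
    intro acc s _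
    by_cases h1 : (ht.getD s "" == (PySem.List.dedup cs).headD "") = true <;>
      by_cases h2 : (if (PySem.List.dedup cs).length = 1 then 1 else 2) ≤ (pvMatchLoopA ht (PySem.List.dedup cs).tail 1 s).1 <;>
        (simp [h1, h2]; try (split_ifs <;> simp_all))
  rw [PySem.List.foldl_congr_mem (List.range ht.length) _
    (fun acc s =>
      if ((ht.getD s "" == (PySem.List.dedup cs).headD "") &&
          decide ((if (PySem.List.dedup cs).length = 1 then 1 else 2) ≤
            (pvMatchLoopA ht (PySem.List.dedup cs).tail 1 s).1)) then
        acc ++ [(s, (pvMatchLoopA ht (PySem.List.dedup cs).tail 1 s).2)]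
      else acc) [] hcongr]
  rw [PySem.List.foldl_append_if]
  simp only [List.nil_append, List.mem_map, List.mem_filter, List.mem_range, Bool.and_eq_true,
    decide_eq_true_eq]
  constructor
  · rintro ⟨s, ⟨hs, hbeq, hreq⟩, rfl⟩
    exact ⟨s, hs, hbeq, hreq, rfl⟩
  · rintro ⟨s, hs, hbeq, hreq, rfl⟩
    exact ⟨s, ⟨hs, hbeq, hreq⟩, rfl⟩

-- one step of the forward scan
theorem pvFwdScanB_step (t a : List String) (j f : Nat) :
    pvFwdScanB t a j (f + 1) =
      (decide (j < t.length) &&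
        (a.contains (t.getD j "") ||
          (pvBridgeWords.contains (t.getD j "") && pvFwdScanB t a (j + 1) f))) := by
  simp only [pvFwdScanB]
  by_cases hj : j < t.length
  · cases hA : a.contains (t.getD j "") <;>
      cases hB : pvBridgeWords.contains (t.getD j "") <;> simp [hj, hA, hB]
  · simp [hj]

-- fully unrolled forward scan (fuel 3)
theorem pvFwdScanB_three (t a : List String) (j : Nat) :
    pvFwdScanB t a j 3 =
      (decide (j < t.length) &&
        (a.contains (t.getD j "") ||
          (pvBridgeWords.contains (t.getD j "") && decide (j + 1 < t.length) &&
            (a.contains (t.getD (j + 1) "") ||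
              (pvBridgeWords.contains (t.getD (j + 1) "") && decide (j + 2 < t.length) &&
                a.contains (t.getD (j + 2) "")))))) := by
  rw [show (3 : Nat) = 2 + 1 from rfl, pvFwdScanB_step,
      show (2 : Nat) = 1 + 1 from rfl, pvFwdScanB_step,
      show (1 : Nat) = 0 + 1 from rfl, pvFwdScanB_step]
  simp [pvFwdScanB, Bool.and_assoc]

-- drop/take windows as explicit one- and two-element lists
theorem pvTakeDropOne (l : List String) (i : Nat) (h : i < l.length) :
    (l.drop i).take 1 = [l.getD i ""] := by
  rw [List.drop_eq_getElem_cons h, List.take_succ_cons, List.take_zero]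
  simp [List.getD, List.getElem?_eq_getElem h]

theorem pvTakeDropTwo (l : List String) (i : Nat) (h : i + 1 < l.length) :
    (l.drop i).take 2 = [l.getD i "", l.getD (i + 1) ""] := by
  rw [List.drop_eq_getElem_cons (by omega : i < l.length), List.drop_eq_getElem_cons h,
    List.take_succ_cons, List.take_succ_cons, List.take_zero]
  simp [List.getD, List.getElem?_eq_getElem h, List.getElem?_eq_getElem (by omega : i < l.length)]

-- forward window scan captures exactly A's forward bridge condition
theorem pvFwdScanB_iff (ht ha : List String) (e : Nat) :
    pvFwdScanB ht ha (e + 1) 3 = true ↔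
      ∃ act, e < act ∧ act < ht.length ∧ ha.contains (ht.getD act "") = true ∧
        pvBridgeOkA ((ht.drop (e + 1)).take (act - (e + 1))) = true := by
  rw [pvFwdScanB_three]
  simp only [Bool.and_eq_true, Bool.or_eq_true, decide_eq_true_eq]
  constructor
  · rintro ⟨h1, hcase⟩
    rcases hcase with hA0 | ⟨⟨hB0, h2⟩, hcase⟩
    · refine ⟨e + 1, by omega, h1, hA0, ?_⟩
      rw [show e + 1 - (e + 1) = 0 by omega]
      simp [pvBridgeOkA]
    · rcases hcase with hA1 | ⟨⟨hB1, h3⟩, hA2⟩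
      · refine ⟨e + 2, by omega, h2, hA1, ?_⟩
        rw [show e + 2 - (e + 1) = 1 by omega, pvTakeDropOne ht (e + 1) h1]
        simp only [pvBridgeOkA, List.all_cons, List.all_nil, Bool.and_eq_true, decide_eq_true_eq,
          Bool.and_true]
        exact ⟨by simp, hB0⟩
      · refine ⟨e + 3, by omega, h3, hA2, ?_⟩
        rw [show e + 3 - (e + 1) = 2 by omega, pvTakeDropTwo ht (e + 1) h2]
        simp only [pvBridgeOkA, List.all_cons, List.all_nil, Bool.and_eq_true, decide_eq_true_eq,
          Bool.and_true]
        exact ⟨by simp, hB0, hB1⟩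
  · rintro ⟨act, hlt, hn, hcont, hok⟩
    have hee : e + 1 < ht.length := by omega
    have hle : act - (e + 1) ≤ 2 := by
      by_contra hgt
      have hlen : ((ht.drop (e + 1)).take (act - (e + 1))).length = act - (e + 1) := by
        simp [List.length_take, List.length_drop]; omega
      simp only [pvBridgeOkA, Bool.and_eq_true, decide_eq_true_eq] at hok
      have := hok.1
      rw [hlen] at this
      omega
    have hcases : act = e + 1 ∨ act = e + 2 ∨ act = e + 3 := by omega
    rcases hcases with rfl | rfl | rfl
    · exact ⟨hn, Or.inl hcont⟩
    · rw [show e + 2 - (e + 1) = 1 by omega, pvTakeDropOne ht (e + 1) hee] at hok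
      simp only [pvBridgeOkA, List.all_cons, List.all_nil, Bool.and_eq_true, decide_eq_true_eq,
        Bool.and_true] at hok
      exact ⟨hee, Or.inr ⟨⟨hok.2, hn⟩, Or.inl hcont⟩⟩
    · have hee2 : e + 2 < ht.length := by omega
      rw [show e + 3 - (e + 1) = 2 by omega, pvTakeDropTwo ht (e + 1) hee2] at hok
      simp only [pvBridgeOkA, List.all_cons, List.all_nil, Bool.and_eq_true, decide_eq_true_eq,
        Bool.and_true] at hok
      exact ⟨hee, Or.inr ⟨⟨hok.2.1, hee2⟩, Or.inr ⟨⟨hok.2.2, hn⟩, hcont⟩⟩⟩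

-- backward window scan captures exactly A's backward bridge condition
theorem pvBwdB_iff (ht ha : List String) (s : Nat) (hs : s ≤ ht.length) :
    pvBwdB ht ha s = true ↔
      ∃ act, act < ht.length ∧ ha.contains (ht.getD act "") = true ∧ act < s ∧
        ¬(decide (ht.length ≤ act + 1) || (ht.getD (act + 1) "" != "of")) = true ∧
        pvBridgeOkA ((ht.drop (act + 2)).take (s - (act + 2))) = true := by
  unfold pvBwdB
  rw [List.any_eq_true]
  constructor
  · rintro ⟨act, hmem, hcond⟩
    rw [List.mem_range'_1] at hmem
    simp only [Bool.and_eq_true, decide_eq_true_eq] at hcond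
    obtain ⟨⟨⟨hcont, hlt1⟩, hof⟩, hall⟩ := hcond
    have hacts : act < s := by omega
    refine ⟨act, by omega, hcont, hacts, ?_, ?_⟩
    · simp only [Bool.or_eq_true, decide_eq_true_eq, bne_iff_ne, ne_eq]
      push Not
      constructor
      · omega
      · simpa using hof
    · simp only [pvBridgeOkA, Bool.and_eq_true, decide_eq_true_eq]
      constructor
      · have : ((ht.drop (act + 2)).take (s - (act + 2))).length ≤ s - (act + 2) := by
          simp [List.length_take, List.length_drop]
        omega
      · exact hall
  · rintro ⟨act, hn, hcont, hlt, hguard, hok⟩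
    simp only [Bool.or_eq_true, decide_eq_true_eq, bne_iff_ne, ne_eq] at hguard
    push Not at hguard
    obtain ⟨hlt1, hof⟩ := hguard
    simp only [pvBridgeOkA, Bool.and_eq_true, decide_eq_true_eq] at hok
    have hlen : ((ht.drop (act + 2)).take (s - (act + 2))).length = s - (act + 2) := by
      simp [List.length_take, List.length_drop]
      omega
    have hge : s - 4 ≤ act := by
      have := hok.1
      rw [hlen] at this
      omega
    refine ⟨act, ?_, ?_⟩
    · rw [List.mem_range'_1]
      omega
    · simp only [Bool.and_eq_true, decide_eq_true_eq]
      exact ⟨⟨⟨hcont, hlt1⟩, by simpa using hof⟩, hok.2⟩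

-- ===== VERDICT (by name: the statement is the Claim_ definition above) =====
theorem check_subject_action_alignment_py_spec : Claim_equal_check_subject_action_alignment_py := by
  intro cs ca ht ha _
  unfold Spec_check_subject_action_alignment_py
  by_cases hcs : cs = []
  · simp [check_subject_action_alignment_py, check_subject_action_alignment_py_alt, hcs]
  by_cases hht : ht = []
  · simp [check_subject_action_alignment_py, check_subject_action_alignment_py_alt, hht]
  have hiff : ∀ a b : Bool, (a = true ↔ b = true) → a = b := by decide
  have hmainA : check_subject_action_alignment_py cs ca ht ha =
      ((List.range ht.length).filter (fun i => ha.contains (ht.getD i ""))).any (fun act =>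
        (pvFindSubjectSpans cs ht).any (fun se =>
          (decide (se.2 < act) && pvBridgeOkA ((ht.drop (se.2 + 1)).take (act - (se.2 + 1)))) ||
          (decide (act < se.1) &&
            (if decide (ht.length ≤ act + 1) || (ht.getD (act + 1) "" != "of") then false
             else pvBridgeOkA ((ht.drop (act + 2)).take (se.1 - (act + 2))))))) := by
    simp only [check_subject_action_alignment_py]
    rw [if_neg (by simp [hcs, hht])]
    split_ifs with h
    · rcases h with h | h <;> rw [h] <;> simp
    · rfl
  have hmainB : check_subject_action_alignment_py_alt cs ca ht ha =
      (List.range ht.length).any (fun start =>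
        (ht.getD start "" == (PySem.List.dedup cs).headD "") &&
        (decide ((if (PySem.List.dedup cs).length = 1 then 0 else 1) ≤
            (pvExtendB ht start (PySem.List.dedup cs).tail 0).1) &&
         (pvFwdScanB ht ha ((pvExtendB ht start (PySem.List.dedup cs).tail 0).2 + 1) 3 ||
          pvBwdB ht ha start))) := by
    simp only [check_subject_action_alignment_py_alt]
    rw [if_neg (by simp [hcs, hht])]
  rw [hmainA, hmainB]
  apply hiff
  have hml : ∀ s : Nat, pvMatchLoopA ht (PySem.List.dedup cs).tail 1 s
      = ((pvExtendB ht s (PySem.List.dedup cs).tail 0).1 + 1,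
         (pvExtendB ht s (PySem.List.dedup cs).tail 0).2) :=
    fun s => pvMatchLoopA_eq ht (PySem.List.dedup cs).tail s 0
  simp only [List.any_eq_true, List.mem_filter, List.mem_range, Bool.and_eq_true, Bool.or_eq_true,
    decide_eq_true_eq]
  constructor
  · rintro ⟨act, ⟨hactn, hcont⟩, se, hse, hpred⟩
    rw [pvFindSubjectSpans_mem cs ht hcs hht] at hse
    obtain ⟨s, hsn, hbeq, hreq, rfl⟩ := hse
    refine ⟨s, hsn, hbeq, ?_, ?_⟩
    · rw [hml s] at hreq
      revert hreq
      split_ifs <;> (intro hreq; omega)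
    · rcases hpred with ⟨hlt, hok⟩ | ⟨hlt, hok⟩
      · left
        apply (pvFwdScanB_iff ht ha _).mpr
        have hlt' : (pvMatchLoopA ht (PySem.List.dedup cs).tail 1 s).2 < act := hlt
        have hok' : pvBridgeOkA ((ht.drop ((pvMatchLoopA ht (PySem.List.dedup cs).tail 1 s).2 + 1)).take
            (act - ((pvMatchLoopA ht (PySem.List.dedup cs).tail 1 s).2 + 1))) = true := hok
        rw [hml s] at hlt' hok'
        exact ⟨act, hlt', hactn, hcont, hok'⟩
      · right
        have hlt' : act < s := hlt
        have hs_le : s ≤ ht.length := by omega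
        apply (pvBwdB_iff ht ha s hs_le).mpr
        revert hok
        split_ifs with hg
        · intro hok; exact absurd hok (by simp)
        · intro hok
          exact ⟨act, hactn, hcont, hlt', by simpa using hg, hok⟩
  · rintro ⟨s, hsn, hbeq, hneed, hrest⟩
    have hreq : (if (PySem.List.dedup cs).length = 1 then 1 else 2) ≤
        (pvMatchLoopA ht (PySem.List.dedup cs).tail 1 s).1 := by
      rw [hml s]
      revert hneed
      split_ifs <;> (intro hneed; omega)
    have hsemem : (s, (pvMatchLoopA ht (PySem.List.dedup cs).tail 1 s).2) ∈ pvFindSubjectSpans cs ht := by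
      rw [pvFindSubjectSpans_mem cs ht hcs hht]
      exact ⟨s, hsn, hbeq, hreq, rfl⟩
    rcases hrest with hfwd | hbwd
    · obtain ⟨act, hlt, hactn, hcont, hok⟩ := (pvFwdScanB_iff ht ha _).mp hfwd
      refine ⟨act, ⟨hactn, hcont⟩, (s, (pvMatchLoopA ht (PySem.List.dedup cs).tail 1 s).2), hsemem, ?_⟩
      left
      constructor
      · show (pvMatchLoopA ht (PySem.List.dedup cs).tail 1 s).2 < act
        rw [hml s]
        exact hlt
      · show pvBridgeOkA ((ht.drop ((pvMatchLoopA ht (PySem.List.dedup cs).tail 1 s).2 + 1)).take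
            (act - ((pvMatchLoopA ht (PySem.List.dedup cs).tail 1 s).2 + 1))) = true
        rw [hml s]
        exact hok
    · obtain ⟨act, hactn, hcont, hlt, hguard, hok⟩ := (pvBwdB_iff ht ha s (by omega)).mp hbwd
      refine ⟨act, ⟨hactn, hcont⟩, (s, (pvMatchLoopA ht (PySem.List.dedup cs).tail 1 s).2), hsemem, ?_⟩
      right
      refine ⟨hlt, ?_⟩
      rw [if_neg (by simpa using hguard)]
      exact hok
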